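-- pv_equiv track=rewrite | github.com/archord/UIDetector | grayImg.py | analysisRowLayout
-- ===== SOURCE A (Python) =====
-- def isBGRow(row):
--
--     return len(row)==1 and row[0][1]>0
--
-- def analysisRowLayout(imgColorCount, elementMinHeight=5):
--
--     bgRowIdxs = []
--     for i, rowCount in enumerate(imgColorCount):
--         if isBGRow(rowCount):
--             bgRowIdxs.append(i)
--
--     layoutIdxs = []
--     for i, rowIdx in enumerate(bgRowIdxs[:len(bgRowIdxs)-1]):
--         if bgRowIdxs[i+1] - bgRowIdxs[i] >elementMinHeight:
--             layoutIdxs.append([bgRowIdxs[i], bgRowIdxs[i+1]])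
--
--     return layoutIdxs
-- ===== SOURCE B (Python) =====
-- def analysisRowLayout(imgColorCount, elementMinHeight=5):
--     # single pass: stream rows, remember the last background row index seen
--     layoutIdxs = []
--     prev = None
--     for i, rowCount in enumerate(imgColorCount):
--         if len(rowCount) == 1 and rowCount[0][1] > 0:
--             if prev is not None and i - prev > elementMinHeight:
--                 layoutIdxs.append([prev, i])
--             prev = i
--     return layoutIdxs
-- ===== Notes on version B (the rewrite author's own statement) =====
-- stated objective: simpler
-- what changed: A builds an intermediate list of all background-row indices and then runs a second loop over its adjacent pairs; B is a single streaming pass over enumerate(imgColorCount) that keeps only the previous background index and emits an interval whenever the gap to the current one exceeds elementMinHeight, eliminating the intermediate list and the second loop.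
import Mathlib
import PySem

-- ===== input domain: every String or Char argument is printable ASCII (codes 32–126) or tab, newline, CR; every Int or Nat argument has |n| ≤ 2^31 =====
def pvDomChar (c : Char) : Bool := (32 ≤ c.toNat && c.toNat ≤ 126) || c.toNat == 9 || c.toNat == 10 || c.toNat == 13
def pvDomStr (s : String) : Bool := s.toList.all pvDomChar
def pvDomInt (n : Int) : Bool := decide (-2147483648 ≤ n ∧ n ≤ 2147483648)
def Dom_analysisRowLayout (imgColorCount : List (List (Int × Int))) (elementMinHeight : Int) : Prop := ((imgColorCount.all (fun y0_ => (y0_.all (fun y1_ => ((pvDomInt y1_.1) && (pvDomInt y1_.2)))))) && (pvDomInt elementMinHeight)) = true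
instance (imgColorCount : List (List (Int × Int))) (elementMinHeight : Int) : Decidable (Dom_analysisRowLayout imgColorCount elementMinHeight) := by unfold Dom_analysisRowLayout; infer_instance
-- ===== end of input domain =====

-- B replaces A's two phases (collect the list of background-row indices, then scan its adjacent
-- pairs) by one streaming pass that keeps only the previous background index; objective: simpler.

-- ===== PORT A =====
def isBGRow (row : List (Int × Int)) : Bool :=
  row.length == 1 &&
    (match PySem.List.pyGet? row 0 with   -- row[0][1] > 0; index 0 in range whenever the first conjunct holds
     | some p => decide (0 < p.2)
     | none => false)

def analysisRowLayout (imgColorCount : List (List (Int × Int))) (elementMinHeight : Int) : List (List Int) :=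
  let bgRowIdxs : List Int :=
    (PySem.List.enumerate imgColorCount).foldl
      (fun acc p => if isBGRow p.2 then acc ++ [p.1] else acc) []
  -- enumerate(bgRowIdxs[:len(bgRowIdxs)-1]); the indices i and i+1 are always in range,
  -- so Python's bgRowIdxs[i] is ported as pyGetD with an unreachable default
  (PySem.List.enumerate (PySem.List.slice bgRowIdxs none (some ((bgRowIdxs.length : Int) - 1)))).foldl
      (fun acc p =>
        if PySem.List.pyGetD bgRowIdxs (p.1 + 1) 0 - PySem.List.pyGetD bgRowIdxs p.1 0 > elementMinHeight
        then acc ++ [[PySem.List.pyGetD bgRowIdxs p.1 0, PySem.List.pyGetD bgRowIdxs (p.1 + 1) 0]]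
        else acc) []

-- ===== PORT B =====
def analysisRowLayout_alt (imgColorCount : List (List (Int × Int))) (elementMinHeight : Int) : List (List Int) :=
  ((PySem.List.enumerate imgColorCount).foldl
    (fun (st : List (List Int) × Option Int) p =>
      if p.2.length == 1 &&
          (match PySem.List.pyGet? p.2 0 with
           | some q => decide (0 < q.2)
           | none => false) then
        (match st.2 with
         | some prev => if p.1 - prev > elementMinHeight then st.1 ++ [[prev, p.1]] else st.1
         | none => st.1,
         some p.1)
      else st)
    ([], none)).1

-- ===== PRECONDITION & SPEC =====
def Spec_analysisRowLayout (imgColorCount : List (List (Int × Int))) (elementMinHeight : Int) (out : List (List Int)) : Prop := out = analysisRowLayout_alt imgColorCount elementMinHeight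
instance (imgColorCount : List (List (Int × Int))) (elementMinHeight : Int) (out : List (List Int)) : Decidable (Spec_analysisRowLayout imgColorCount elementMinHeight out) := by unfold Spec_analysisRowLayout; infer_instance

-- ===== CLAIM (what is proved, stated in full; the proofs are below) =====
def Claim_equal_analysisRowLayout : Prop := ∀ (imgColorCount : List (List (Int × Int))) (elementMinHeight : Int), Dom_analysisRowLayout imgColorCount elementMinHeight → Spec_analysisRowLayout imgColorCount elementMinHeight (analysisRowLayout imgColorCount elementMinHeight)

-- ===== LEMMAS AND PROOFS =====

/-- Adjacent pairs of the index list whose gap exceeds `h`. -/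
def gaps (h : Int) : List Int → List (List Int)
  | a :: b :: t => (if b - a > h then [[a, b]] else []) ++ gaps h (b :: t)
  | _ => []

/-- Indices (starting at `s`) of background rows. -/
def bgIdx : List (List (Int × Int)) → Int → List Int
  | [], _ => []
  | r :: rs, s => (if isBGRow r then [s] else []) ++ bgIdx rs (s + 1)

theorem A_first_loop (rows : List (List (Int × Int))) :
    ∀ (s : Int) (acc : List Int),
      (PySem.List.enumerate rows s).foldl
        (fun acc p => if isBGRow p.2 then acc ++ [p.1] else acc) acc
      = acc ++ bgIdx rows s := by
  induction rows with
  | nil => intro s acc; simp [PySem.List.enumerate, bgIdx]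
  | cons r rs ih =>
      intro s acc
      rw [PySem.List.enumerate_cons]
      simp only [List.foldl_cons, bgIdx]
      by_cases hbg : isBGRow r
      · simp [hbg, ih]
      · simp [hbg, ih]

/-- The Nat-indexed core of A's second loop equals `gaps`. -/
theorem A_second_core (h : Int) (l : List Int) :
    ∀ (acc : List (List Int)),
      (List.range (l.length - 1)).foldl
        (fun a (i : Nat) =>
          if l.getD (i + 1) 0 - l.getD i 0 > h
          then a ++ [[l.getD i 0, l.getD (i + 1) 0]]
          else a) acc
      = acc ++ gaps h l := by
  induction l with
  | nil => intro acc; simp [gaps]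
  | cons a t ih =>
      intro acc
      match t with
      | [] => simp [gaps]
      | b :: t' =>
          have hlen : (a :: b :: t').length - 1 = ((b :: t').length - 1) + 1 := by
            simp [List.length_cons]
          rw [hlen, List.range_succ_eq_map, List.foldl_cons, List.foldl_map]
          simp only [Nat.succ_eq_add_one, List.getD_cons_succ, List.getD_cons_zero,
            Nat.zero_add] at ih ⊢
          rw [ih]
          by_cases hgap : b - a > h
          · simp [gaps, hgap]
          · simp [gaps, hgap]

/-- A's second loop (over `enumerate` of the dropLast slice, Int indices) equals `gaps`. -/
theorem A_second_loop (h : Int) (l : List Int) :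
    (PySem.List.enumerate (PySem.List.slice l none (some ((l.length : Int) - 1)))).foldl
      (fun acc p =>
        if PySem.List.pyGetD l (p.1 + 1) 0 - PySem.List.pyGetD l p.1 0 > h
        then acc ++ [[PySem.List.pyGetD l p.1 0, PySem.List.pyGetD l (p.1 + 1) 0]]
        else acc) []
    = gaps h l := by
  have hslice : PySem.List.slice l none (some ((l.length : Int) - 1)) = l.dropLast := by
    match l with
    | [] => simp [PySem.List.slice]
    | x :: xs =>
        rw [PySem.List.slice_to (x :: xs) (by simp [List.length_cons])]
        have h1 : ((((x :: xs).length : Int) - 1)).toNat = (x :: xs).length - 1 := by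
          simp [List.length_cons]
        rw [h1, List.dropLast_eq_take]
  rw [hslice, PySem.List.enumerate_eq_map_pyRange l.dropLast 0, List.foldl_map]
  have hdrop : PySem.List.len l.dropLast = ((l.length - 1 : Nat) : Int) := by
    simp [PySem.List.len, List.length_dropLast]
  rw [hdrop, PySem.List.pyRange_zero_natCast, List.foldl_map]
  have hbody :
      (fun (x : List (List Int)) (y : Nat) =>
        if PySem.List.pyGetD l ((y : Int) + 1) 0 - PySem.List.pyGetD l (y : Int) 0 > h
        then x ++ [[PySem.List.pyGetD l (y : Int) 0, PySem.List.pyGetD l ((y : Int) + 1) 0]]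
        else x)
      = (fun (x : List (List Int)) (i : Nat) =>
        if l.getD (i + 1) 0 - l.getD i 0 > h
        then x ++ [[l.getD i 0, l.getD (i + 1) 0]]
        else x) := by
    funext x y
    have h1 : ((y : Int) + 1) = ((y + 1 : Nat) : Int) := by push_cast; ring
    rw [h1, PySem.List.pyGetD_natCast, PySem.List.pyGetD_natCast]
  simp only [hbody]
  exact A_second_core h l []

/-- `gaps` with an optional pending previous background index. -/
def joinGaps (h : Int) : Option Int → List Int → List (List Int)
  | none, l => gaps h l
  | some p, l => gaps h (p :: l)

theorem B_loop (h : Int) (rows : List (List (Int × Int))) :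
    ∀ (s : Int) (prev : Option Int) (acc : List (List Int)),
      ((PySem.List.enumerate rows s).foldl
        (fun (st : List (List Int) × Option Int) p =>
          if p.2.length == 1 &&
              (match PySem.List.pyGet? p.2 0 with
               | some q => decide (0 < q.2)
               | none => false) then
            (match st.2 with
             | some prev => if p.1 - prev > h then st.1 ++ [[prev, p.1]] else st.1
             | none => st.1,
             some p.1)
          else st)
        (acc, prev)).1
      = acc ++ joinGaps h prev (bgIdx rows s) := by
  induction rows with
  | nil => intro s prev acc; cases prev <;> simp [PySem.List.enumerate, bgIdx, joinGaps, gaps]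
  | cons r rs ih =>
      intro s prev acc
      rw [PySem.List.enumerate_cons]
      simp only [List.foldl_cons, bgIdx]
      by_cases hbg : isBGRow r
      · have hb : (r.length == 1 &&
            (match PySem.List.pyGet? r 0 with
             | some q => decide (0 < q.2)
             | none => false)) = true := hbg
        simp only [hb, ite_true]
        cases prev with
        | none => simpa [joinGaps, hbg] using ih (s + 1) (some s) acc
        | some p =>
            by_cases hgap : s - p > h
            · simpa [joinGaps, gaps, hgap, hbg] using ih (s + 1) (some s) (acc ++ [[p, s]])
            · simpa [joinGaps, gaps, hgap, hbg] using ih (s + 1) (some s) acc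
      · have hb : (r.length == 1 &&
            (match PySem.List.pyGet? r 0 with
             | some q => decide (0 < q.2)
             | none => false)) = false := by
          simpa [isBGRow] using hbg
        simp only [hb]
        simpa [hbg] using ih (s + 1) prev acc

-- ===== VERDICT (by name: the statement is the Claim_ definition above) =====
theorem analysisRowLayout_spec : Claim_equal_analysisRowLayout := by
  intro img h _
  unfold Spec_analysisRowLayout analysisRowLayout analysisRowLayout_alt
  rw [A_first_loop img 0 []]
  simp only [List.nil_append]
  rw [A_second_loop h (bgIdx img 0)]
  rw [B_loop h img 0 none []]
  simp [joinGaps]
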